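-- pv_equiv track=rewrite | github.com/jjoshua2/arc_agi | unsolved/2025-10-02T21-13-22Z/264363fd_best1.py | transform
-- ===== SOURCE A (Python) =====
-- def transform(grid: list[list[int]]) -> list[list[int]]:
--     if not grid or not grid[0]:
--         return []
--     h = len(grid)
--     w = len(grid[0])
--     output = [row[:] for row in grid]
--     reds = [(i, j) for i in range(h) for j in range(w) if grid[i][j] == 2]
--     directions = [(-1, 0), (1, 0), (0, -1), (0, 1)]
--
--     # First pass: set projections to 2 and fill supports with 8
--     for red_r, red_c in reds:
--         for dr, dc in directions:
--             cur_r = red_r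
--             cur_c = red_c
--             while True:
--                 cur_r += dr
--                 cur_c += dc
--                 if not (0 <= cur_r < h and 0 <= cur_c < w):
--                     break
--                 if grid[cur_r][cur_c] == 8:
--                     # Hit: set projection to 2
--                     output[cur_r][cur_c] = 2
--                     # Fill 3x3 support except center
--                     for ddr in range(-1, 2):
--                         for ddc in range(-1, 2):
--                             nr = cur_r + ddr
--                             nc = cur_c + ddc
--                             if 0 <= nr < h and 0 <= nc < w and not (ddr == 0 and ddc == 0):
--                                 output[nr][nc] = 8
--                     break  # Stop after first hit in this direction
--
--     # Second pass: fill paths with 2 only if 0 (respects supports)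
--     for red_r, red_c in reds:
--         for dr, dc in directions:
--             path = []
--             cur_r = red_r
--             cur_c = red_c
--             hit = False
--             while True:
--                 cur_r += dr
--                 cur_c += dc
--                 if not (0 <= cur_r < h and 0 <= cur_c < w):
--                     break
--                 if grid[cur_r][cur_c] == 8:
--                     hit = True
--                     break
--                 path.append((cur_r, cur_c))
--             if hit:
--                 for pr, pc in path:
--                     if output[pr][pc] == 0:
--                         output[pr][pc] = 2
--
--     return output
-- ===== SOURCE B (Python) =====
-- def transform(grid: list[list[int]]) -> list[list[int]]:
--     if not grid or not grid[0]:
--         return []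
--     h = len(grid)
--     w = len(grid[0])
--     output = [row[:] for row in grid]
--     reds = [(i, j) for i in range(h) for j in range(w) if grid[i][j] == 2]
--     directions = [(-1, 0), (1, 0), (0, -1), (0, 1)]
--     deferred = []
--     # Single pass over rays: on a hit, place projection + support immediately
--     # (in original order) and defer the path cells.
--     for (red_r, red_c), (dr, dc) in [(red, d) for red in reds for d in directions]:
--         path = []
--         cur_r, cur_c = red_r, red_c
--         while True:
--             cur_r += dr
--             cur_c += dc
--             if not (0 <= cur_r < h and 0 <= cur_c < w):
--                 break
--             if grid[cur_r][cur_c] == 8: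
--                 output[cur_r][cur_c] = 2
--                 for ddr in (-1, 0, 1):
--                     for ddc in (-1, 0, 1):
--                         nr, nc = cur_r + ddr, cur_c + ddc
--                         if 0 <= nr < h and 0 <= nc < w and not (ddr == 0 and ddc == 0):
--                             output[nr][nc] = 8
--                 deferred.extend(path)
--                 break
--             path.append((cur_r, cur_c))
--     # After all supports are placed, fill the deferred path cells.
--     for pr, pc in deferred:
--         if output[pr][pc] == 0:
--             output[pr][pc] = 2
--     return output
-- ===== Notes on version B (the rewrite author's own statement) =====
-- stated objective: alternative
-- what changed: The two repeated ray-scans over reds x directions are fused into one scan that places projections/supports immediately and collects path cells into a deferred list, filled in a single final pass.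
import Mathlib
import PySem

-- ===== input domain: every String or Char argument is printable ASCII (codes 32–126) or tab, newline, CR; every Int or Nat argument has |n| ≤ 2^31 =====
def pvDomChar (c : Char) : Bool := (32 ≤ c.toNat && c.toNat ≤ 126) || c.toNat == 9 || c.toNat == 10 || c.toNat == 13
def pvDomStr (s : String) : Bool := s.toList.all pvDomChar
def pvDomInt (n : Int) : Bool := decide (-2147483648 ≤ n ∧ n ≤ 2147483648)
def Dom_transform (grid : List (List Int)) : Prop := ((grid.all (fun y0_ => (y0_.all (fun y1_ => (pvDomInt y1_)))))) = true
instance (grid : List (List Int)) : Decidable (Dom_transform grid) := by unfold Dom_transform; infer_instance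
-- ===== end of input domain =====

-- One honest line: B fuses A's two ray-scan passes into one scan with a deferred
-- path-fill list applied in a final pass (alternative decomposition, same cost).
-- Both Pythons mutate only their local copy of the grid; no caller-visible mutation.

-- shared low-level primitives (in-bounds reads/writes; guards are in the callers)
def cellAt (g : List (List Int)) (r c : Int) : Int := (g.getD r.toNat []).getD c.toNat 0

def setCell (g : List (List Int)) (r c : Int) (v : Int) : List (List Int) :=
  g.set r.toNat ((g.getD r.toNat []).set c.toNat v)

-- Fill the 3x3 support around (cr,cc), skipping the center (Python's ddr/ddc loops).
def fillSupport (h w cr cc : Int) (out : List (List Int)) : List (List Int) :=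
  (PySem.List.pyRange (-1) 2 1).foldl (fun out ddr =>
    (PySem.List.pyRange (-1) 2 1).foldl (fun out ddc =>
      let nr := cr + ddr
      let nc := cc + ddc
      if (0 ≤ nr ∧ nr < h ∧ 0 ≤ nc ∧ nc < w) ∧ ¬(ddr = 0 ∧ ddc = 0) then
        setCell out nr nc 8
      else out) out) out

def redsOf (grid : List (List Int)) (h w : Int) : List (Int × Int) :=
  (PySem.List.pyRange 0 h 1).flatMap (fun i =>
    (PySem.List.pyRange 0 w 1).filterMap (fun j =>
      if cellAt grid i j = 2 then some (i, j) else none))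

def dirsList : List (Int × Int) := [(-1, 0), (1, 0), (0, -1), (0, 1)]

-- ===== PORT A =====
-- first-pass while loop: walk outward, on a hit set the cell to 2 and fill the support
def walkA1 (g : List (List Int)) (h w dr dc : Int) (r c : Int)
    (out : List (List Int)) : Nat → List (List Int)
  | 0 => out
  | fuel + 1 =>
    let r' := r + dr
    let c' := c + dc
    if ¬(0 ≤ r' ∧ r' < h ∧ 0 ≤ c' ∧ c' < w) then out
    else if cellAt g r' c' = 8 then fillSupport h w r' c' (setCell out r' c' 2)
    else walkA1 g h w dr dc r' c' out fuel

-- second-pass while loop: collect the path cells and report whether an 8 was hit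
def walkA2 (g : List (List Int)) (h w dr dc : Int) (r c : Int)
    (path : List (Int × Int)) : Nat → List (Int × Int) × Bool
  | 0 => (path, false)
  | fuel + 1 =>
    let r' := r + dr
    let c' := c + dc
    if ¬(0 ≤ r' ∧ r' < h ∧ 0 ≤ c' ∧ c' < w) then (path, false)
    else if cellAt g r' c' = 8 then (path, true)
    else walkA2 g h w dr dc r' c' (path ++ [(r', c')]) fuel

def transform (grid : List (List Int)) : List (List Int) :=
  if grid = [] ∨ grid.headD [] = [] then []
  else
    let h : Int := grid.length
    let w : Int := (grid.headD []).length
    let fuel : Nat := grid.length + (grid.headD []).length + 1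
    let output := grid
    let reds := redsOf grid h w
    -- First pass: set projections to 2 and fill supports with 8
    let out1 := reds.foldl (fun out rc =>
      dirsList.foldl (fun out d =>
        walkA1 grid h w d.1 d.2 rc.1 rc.2 out fuel) out) output
    -- Second pass: fill paths with 2 only if 0
    reds.foldl (fun out rc =>
      dirsList.foldl (fun out d =>
        let ph := walkA2 grid h w d.1 d.2 rc.1 rc.2 [] fuel
        if ph.2 then
          ph.1.foldl (fun o p =>
            if cellAt o p.1 p.2 = 0 then setCell o p.1 p.2 2 else o) out
        else out) out) out1

-- ===== PORT B =====
-- fused while loop: mutate on a hit and return the path cells to defer ([] if no hit)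
def walkB (g : List (List Int)) (h w dr dc : Int) (r c : Int)
    (out : List (List Int)) (path : List (Int × Int)) :
    Nat → List (List Int) × List (Int × Int)
  | 0 => (out, [])
  | fuel + 1 =>
    let r' := r + dr
    let c' := c + dc
    if ¬(0 ≤ r' ∧ r' < h ∧ 0 ≤ c' ∧ c' < w) then (out, [])
    else if cellAt g r' c' = 8 then
      (fillSupport h w r' c' (setCell out r' c' 2), path)
    else walkB g h w dr dc r' c' out (path ++ [(r', c')]) fuel

def transform_alt (grid : List (List Int)) : List (List Int) :=
  if grid = [] ∨ grid.headD [] = [] then []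
  else
    let h : Int := grid.length
    let w : Int := (grid.headD []).length
    let fuel : Nat := grid.length + (grid.headD []).length + 1
    let rays := (redsOf grid h w).flatMap (fun red => dirsList.map (fun d => (red, d)))
    -- Single pass over rays: place projections/supports, defer path cells
    let st := rays.foldl (fun (st : List (List Int) × List (Int × Int)) rd =>
      let op := walkB grid h w rd.2.1 rd.2.2 rd.1.1 rd.1.2 st.1 [] fuel
      (op.1, st.2 ++ op.2)) (grid, [])
    -- Final pass: fill the deferred path cells that are still 0
    st.2.foldl (fun o p =>
      if cellAt o p.1 p.2 = 0 then setCell o p.1 p.2 2 else o) st.1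

-- ===== PRECONDITION & SPEC =====
-- Pre_ excludes exactly the ragged grids on which Python A raises IndexError
-- (some row shorter than the first row, which the red scan / writes index past).
def Pre_transform (grid : List (List Int)) : Prop :=
  ∀ row ∈ grid, (grid.headD []).length ≤ row.length
instance (grid : List (List Int)) : Decidable (Pre_transform grid) := by
  unfold Pre_transform; infer_instance

def pvWitness_transform : List (List Int) := [[0, 2, 0], [0, 0, 8], [8, 0, 0]]

def Spec_transform (grid : List (List Int)) (out : List (List Int)) : Prop := out = transform_alt grid
instance (grid : List (List Int)) (out : List (List Int)) : Decidable (Spec_transform grid out) := by unfold Spec_transform; infer_instance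

-- ===== CLAIM (what is proved, stated in full; the proofs are below) =====
def Claim_equal_transform : Prop := ∀ (grid : List (List Int)), Dom_transform grid → Pre_transform grid → Spec_transform grid (transform grid)

-- ===== LEMMAS AND PROOFS =====

-- B's fused walk is A's first-pass walk paired with A's second-pass path (when hit)
theorem walkB_eq (g : List (List Int)) (h w dr dc : Int) :
    ∀ (fuel : Nat) (r c : Int) (out : List (List Int)) (path : List (Int × Int)),
    walkB g h w dr dc r c out path fuel =
      (walkA1 g h w dr dc r c out fuel,
       if (walkA2 g h w dr dc r c path fuel).2 then
         (walkA2 g h w dr dc r c path fuel).1 else []) := by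
  intro fuel
  induction fuel with
  | zero => intro r c out path; simp [walkB, walkA1, walkA2]
  | succ n ih =>
    intro r c out path
    simp only [walkB, walkA1, walkA2]
    split
    · rfl
    · split
      · rfl
      · exact ih _ _ _ _

-- folding a per-element inner fold equals folding over the flattened list
theorem foldl_flatMap' {α β γ : Type} (f : β → γ → β) (g : α → List γ) :
    ∀ (l : List α) (b : β),
    l.foldl (fun b x => (g x).foldl f b) b = (l.flatMap g).foldl f b := by
  intro l
  induction l with
  | nil => intro b; simp
  | cons x xs ih => intro b; simp [List.flatMap_cons, List.foldl_append, ih]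

-- the fused fold splits into A's first-pass fold plus the concatenated deferred paths
theorem fused_split (g : List (List Int)) (h w : Int) (fuel : Nat) :
    ∀ (rays : List ((Int × Int) × (Int × Int))) (out : List (List Int))
      (acc : List (Int × Int)),
    rays.foldl (fun (st : List (List Int) × List (Int × Int)) rd =>
      let op := walkB g h w rd.2.1 rd.2.2 rd.1.1 rd.1.2 st.1 [] fuel
      (op.1, st.2 ++ op.2)) (out, acc) =
    (rays.foldl (fun out rd => walkA1 g h w rd.2.1 rd.2.2 rd.1.1 rd.1.2 out fuel) out,
     acc ++ rays.flatMap (fun rd =>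
       if (walkA2 g h w rd.2.1 rd.2.2 rd.1.1 rd.1.2 [] fuel).2 then
         (walkA2 g h w rd.2.1 rd.2.2 rd.1.1 rd.1.2 [] fuel).1 else [])) := by
  intro rays
  induction rays with
  | nil => intro out acc; simp
  | cons rd rest ih =>
    intro out acc
    have h1 : (let op := walkB g h w rd.2.1 rd.2.2 rd.1.1 rd.1.2 (out, acc).1 [] fuel
        ((op.1 : List (List Int)), (out, acc).2 ++ op.2)) =
        (walkA1 g h w rd.2.1 rd.2.2 rd.1.1 rd.1.2 out fuel,
         acc ++ (if (walkA2 g h w rd.2.1 rd.2.2 rd.1.1 rd.1.2 [] fuel).2 then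
           (walkA2 g h w rd.2.1 rd.2.2 rd.1.1 rd.1.2 [] fuel).1 else [])) := by
      simp [walkB_eq]
    rw [List.foldl_cons, h1, ih, List.flatMap_cons, List.append_assoc, List.foldl_cons]

-- a nested reds×dirs fold equals the fold over the flattened rays list
theorem nested_eq_rays {β : Type} (f : β → (Int × Int) → (Int × Int) → β)
    (reds : List (Int × Int)) :
    ∀ (b : β),
    reds.foldl (fun b rc => dirsList.foldl (fun b d => f b rc d) b) b =
    (reds.flatMap (fun red => dirsList.map (fun d => (red, d)))).foldl
      (fun b rd => f b rd.1 rd.2) b := by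
  induction reds with
  | nil => intro b; simp
  | cons rc rest ih =>
    intro b
    have hhead : dirsList.foldl (fun b d => f b rc d) b =
        List.foldl (fun b rd => f b rd.1 rd.2) b (dirsList.map (fun d => (rc, d))) := by
      simp [dirsList]
    rw [List.foldl_cons, List.flatMap_cons, List.foldl_append, hhead, ih]

-- ===== VERDICT (by name: the statement is the Claim_ definition above) =====
theorem transform_spec : Claim_equal_transform := by
  intro grid _ _
  show transform grid = transform_alt grid
  unfold transform transform_alt
  split
  · rfl
  · simp only []
    rw [nested_eq_rays (fun out rc d => walkA1 grid grid.length (grid.headD []).length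
          d.1 d.2 rc.1 rc.2 out (grid.length + (grid.headD []).length + 1))]
    rw [fused_split]
    simp only [List.nil_append]
    rw [nested_eq_rays (fun out rc d =>
          let ph := walkA2 grid grid.length (grid.headD []).length d.1 d.2 rc.1 rc.2 []
            (grid.length + (grid.headD []).length + 1)
          if ph.2 then
            ph.1.foldl (fun o p =>
              if cellAt o p.1 p.2 = 0 then setCell o p.1 p.2 2 else o) out
          else out)]
    rw [← foldl_flatMap'
      (fun o (p : Int × Int) => if cellAt o p.1 p.2 = 0 then setCell o p.1 p.2 2 else o)
      (fun rd : (Int × Int) × (Int × Int) =>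
        if (walkA2 grid grid.length (grid.headD []).length rd.2.1 rd.2.2 rd.1.1 rd.1.2 []
            (grid.length + (grid.headD []).length + 1)).2 then
          (walkA2 grid grid.length (grid.headD []).length rd.2.1 rd.2.2 rd.1.1 rd.1.2 []
            (grid.length + (grid.headD []).length + 1)).1 else [])]
    have hg : (fun (out : List (List Int)) (rd : (Int × Int) × (Int × Int)) =>
        let ph := walkA2 grid grid.length (grid.headD []).length rd.2.1 rd.2.2 rd.1.1
          rd.1.2 [] (grid.length + (grid.headD []).length + 1)
        if ph.2 then
          ph.1.foldl (fun o p =>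
            if cellAt o p.1 p.2 = 0 then setCell o p.1 p.2 2 else o) out
        else out) =
        (fun out rd =>
          ((if (walkA2 grid grid.length (grid.headD []).length rd.2.1 rd.2.2 rd.1.1
              rd.1.2 [] (grid.length + (grid.headD []).length + 1)).2 then
            (walkA2 grid grid.length (grid.headD []).length rd.2.1 rd.2.2 rd.1.1
              rd.1.2 [] (grid.length + (grid.headD []).length + 1)).1 else []).foldl
            (fun o p => if cellAt o p.1 p.2 = 0 then setCell o p.1 p.2 2 else o) out)) := by
      funext out rd
      simp only []
      split <;> simp
    rw [hg]
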